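-- pv_equiv track=rewrite | github.com/SDET-SOLOMAN/code_wars_python | kata_7s/kooka_counter.py | kooka_counter
-- ===== SOURCE A (Python) =====
-- def kooka_counter(laughing):
--     if not laughing:
--         return 0
--     in_here = None
--     counter = 0
--     for char in laughing:
--         if char != 'a' and in_here != char:
--             in_here = char
--             counter += 1
--     return counter
-- ===== SOURCE B (Python) =====
-- def kooka_counter(laughing):
--     filtered = [c for c in laughing if c != 'a']
--     breaks = sum(1 for x, y in zip(filtered, filtered[1:]) if x != y)
--     return (1 if filtered else 0) + breaks
-- ===== Notes on version B (the rewrite author's own statement) =====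
-- stated objective: simpler
-- what changed: Replaces the online scan with an in_here state variable by two passes: filter out every 'a', then count groups as (1 if nonempty) plus the number of adjacent differing pairs in the filtered list.
import Mathlib
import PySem

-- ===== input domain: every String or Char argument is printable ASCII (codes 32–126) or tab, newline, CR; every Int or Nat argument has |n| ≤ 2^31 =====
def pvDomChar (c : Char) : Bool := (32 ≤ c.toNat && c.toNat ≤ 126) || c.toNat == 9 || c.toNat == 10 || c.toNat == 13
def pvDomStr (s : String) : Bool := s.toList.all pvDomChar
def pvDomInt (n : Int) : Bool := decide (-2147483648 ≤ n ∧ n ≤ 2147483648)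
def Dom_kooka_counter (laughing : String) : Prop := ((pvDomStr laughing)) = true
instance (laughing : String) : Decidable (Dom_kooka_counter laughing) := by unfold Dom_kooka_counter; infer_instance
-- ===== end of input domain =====

-- B replaces A's online scan with an in_here state variable by two passes: filter out 'a', then count groups from adjacent differing pairs.


-- ===== PORT A =====
-- state = (in_here, counter); one step of A's for-loop
def kookaStepA (st : Option Char × Int) (c : Char) : Option Char × Int :=
  if c ≠ 'a' ∧ st.1 ≠ some c then (some c, st.2 + 1) else st

def kooka_counter (laughing : String) : Int :=
  if laughing.toList = [] then 0
  else (laughing.toList.foldl kookaStepA (none, 0)).2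

-- ===== PORT B =====
-- one step of B's sum over zip(filtered, filtered[1:])
def kookaBreakStep (n : Int) (p : Char × Char) : Int :=
  if p.1 ≠ p.2 then n + 1 else n

def kooka_counter_alt (laughing : String) : Int :=
  let filtered := laughing.toList.filter (fun c => c ≠ 'a')
  -- filtered[1:] is List.drop 1 (exact for a nonnegative slice start)
  let breaks := (filtered.zip (filtered.drop 1)).foldl kookaBreakStep 0
  (if filtered = [] then 0 else 1) + breaks

-- ===== PRECONDITION & SPEC =====
def Spec_kooka_counter (laughing : String) (out : Int) : Prop := out = kooka_counter_alt laughing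
instance (laughing : String) (out : Int) : Decidable (Spec_kooka_counter laughing out) := by unfold Spec_kooka_counter; infer_instance

-- ===== CLAIM (what is proved, stated in full; the proofs are below) =====
def Claim_equal_kooka_counter : Prop := ∀ (laughing : String), Dom_kooka_counter laughing → Spec_kooka_counter laughing (kooka_counter laughing)

-- ===== LEMMAS AND PROOFS =====

-- proof-side characterisation: number of maximal equal-character runs
def kookaRuns : List Char → Int
  | [] => 0
  | c :: rest =>
    match rest with
    | d :: _ => if d = c then kookaRuns rest else 1 + kookaRuns rest
    | [] => 1

-- transitions counted by A given previous state o, over an already-filtered list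
def kookaG (o : Option Char) : List Char → Int
  | [] => 0
  | c :: rest => (if some c = o then 0 else 1) + kookaG (some c) rest

theorem kookaG_some (c : Char) (rest : List Char) :
    kookaG (some c) rest = kookaRuns (c :: rest) - 1 := by
  induction rest generalizing c with
  | nil => simp [kookaG, kookaRuns]
  | cons d t ih =>
    simp only [kookaG, kookaRuns]
    rw [ih d]
    by_cases h : d = c
    · simp [h, kookaRuns]
    · have : ¬ (some d = some c) := by simp [h]
      simp [h, this, kookaRuns]

theorem kookaG_none (l : List Char) : kookaG none l = kookaRuns l := by
  cases l with
  | nil => rfl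
  | cons c rest =>
    simp only [kookaG]
    rw [kookaG_some]
    simp

theorem foldlA_snd (l : List Char) (o : Option Char) (n : Int) :
    (l.foldl kookaStepA (o, n)).2 = n + kookaG o (l.filter (fun c => c ≠ 'a')) := by
  induction l generalizing o n with
  | nil => simp [kookaG]
  | cons c rest ih =>
    by_cases ha : c = 'a'
    · subst ha
      simp only [List.foldl_cons, kookaStepA]
      simp [ih]
    · simp only [List.foldl_cons, kookaStepA, List.filter_cons]
      by_cases ho : o = some c
      · simp [ha, ho, ih, kookaG]
      · have : (o ≠ some c) := ho
        simp [ha, this, ih, kookaG, Ne.symm ho]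
        omega

theorem foldlB_breaks (rest : List Char) (c : Char) (n : Int) :
    (((c :: rest).zip rest).foldl kookaBreakStep n) = n + (kookaRuns (c :: rest) - 1) := by
  induction rest generalizing c n with
  | nil => simp [kookaRuns]
  | cons d t ih =>
    simp only [List.zip_cons_cons, List.foldl_cons, kookaBreakStep]
    rw [ih d]
    by_cases h : d = c
    · simp [h, kookaRuns]
    · have : c ≠ d := Ne.symm h
      simp [this, kookaRuns, h]

theorem alt_eq_runs (l : List Char) :
    ((if l = [] then (0 : Int) else 1) + (l.zip (l.drop 1)).foldl kookaBreakStep 0) = kookaRuns l := by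
  cases l with
  | nil => simp [kookaRuns]
  | cons c rest =>
    simp only [List.drop_one, List.tail_cons]
    rw [foldlB_breaks]
    simp

-- ===== VERDICT (by name: the statement is the Claim_ definition above) =====
theorem kooka_counter_spec : Claim_equal_kooka_counter := by
  intro laughing _
  unfold Spec_kooka_counter kooka_counter kooka_counter_alt
  simp only [alt_eq_runs]
  by_cases h : laughing.toList = []
  · simp [h, kookaRuns]
  · rw [if_neg h, foldlA_snd, kookaG_none]
    simp
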